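-- pv_equiv track=rewrite | github.com/jessicabarnett8219/python-orientation-03lists | planets.py | makeSpacecraftList
-- ===== SOURCE A (Python) =====
-- def makeSpacecraftList(planets, voyage_list):
--   spacecraft_list = []
--   for planet in planets:
--     for voyage in voyage_list:
--       if planet in voyage:
--         spacecraft_list.append((planet, voyage[0]))
--         continue
--   return spacecraft_list
-- ===== SOURCE B (Python) =====
-- def makeSpacecraftList(planets, voyage_list):
--   # Index each element to the ordered list of heads of voyages containing it (one pass),
--   # then emit per planet -- no per-planet scan of the voyages.
--   pairs = [(x, v[0]) for v in voyage_list for x in dict.fromkeys(v)]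
--   index = {}
--   for x, head in pairs:
--     index.setdefault(x, []).append(head)
--   return [(p, h) for p in planets for h in index.get(p, [])]
-- ===== Notes on version B (the rewrite author's own statement) =====
-- stated objective: faster
-- what changed: Replaces the per-planet scan of all voyages by a dictionary built once that maps each element to the ordered list of heads of voyages containing it, then emits the pairs per planet by lookup.
import Mathlib
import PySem

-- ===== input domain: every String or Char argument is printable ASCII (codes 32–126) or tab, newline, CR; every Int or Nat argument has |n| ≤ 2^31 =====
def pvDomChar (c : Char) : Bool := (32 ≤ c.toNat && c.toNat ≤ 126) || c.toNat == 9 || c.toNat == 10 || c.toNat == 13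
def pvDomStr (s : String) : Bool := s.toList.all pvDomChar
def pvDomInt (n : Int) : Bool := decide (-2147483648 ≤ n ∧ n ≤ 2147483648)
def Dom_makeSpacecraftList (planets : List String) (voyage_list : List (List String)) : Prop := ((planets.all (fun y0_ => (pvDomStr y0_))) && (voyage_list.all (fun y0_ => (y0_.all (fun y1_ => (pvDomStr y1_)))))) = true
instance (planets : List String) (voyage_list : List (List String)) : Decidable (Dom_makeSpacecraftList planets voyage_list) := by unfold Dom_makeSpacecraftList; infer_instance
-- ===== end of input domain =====

-- B replaces A's per-planet scan of all voyages by an element→voyage-heads index built once (objective: faster, asymptotic).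

-- ===== PORT A =====
-- voyage[0] is only reached when planet ∈ voyage (so voyage ≠ []); pyGetD with dummy default is exact there
def makeSpacecraftList (planets : List String) (voyage_list : List (List String)) : List (String × String) :=
  planets.foldl (fun acc planet =>
    voyage_list.foldl (fun acc2 voyage =>
      if planet ∈ voyage then acc2 ++ [(planet, PySem.List.pyGetD voyage 0 "")] else acc2) acc) []

-- ===== PORT B =====
-- dict.fromkeys(v) (ordered dedup) = PySem.List.dedup; setdefault(x, []).append(h) = Dict.modify x [] (· ++ [h]);
-- v[0] only reached for v ≠ [] (dedup v nonempty), pyGetD with dummy default is exact there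
def makeSpacecraftList_alt (planets : List String) (voyage_list : List (List String)) : List (String × String) :=
  let pairs := voyage_list.flatMap (fun v => (PySem.List.dedup v).map (fun x => (x, PySem.List.pyGetD v 0 "")))
  let index := pairs.foldl (fun d q => d.modify q.1 [] (fun l => l ++ [q.2])) PySem.Dict.empty
  planets.flatMap (fun p => (index.getD p []).map (fun h => (p, h)))

-- ===== PRECONDITION & SPEC =====
def Spec_makeSpacecraftList (planets : List String) (voyage_list : List (List String)) (out : List (String × String)) : Prop := out = makeSpacecraftList_alt planets voyage_list
instance (planets : List String) (voyage_list : List (List String)) (out : List (String × String)) : Decidable (Spec_makeSpacecraftList planets voyage_list out) := by unfold Spec_makeSpacecraftList; infer_instance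

-- ===== CLAIM (what is proved, stated in full; the proofs are below) =====
def Claim_equal_makeSpacecraftList : Prop := ∀ (planets : List String) (voyage_list : List (List String)), Dom_makeSpacecraftList planets voyage_list → Spec_makeSpacecraftList planets voyage_list (makeSpacecraftList planets voyage_list)

-- ===== LEMMAS AND PROOFS =====

-- on a Nodup list, filtering for equality with p keeps exactly [p] when present
lemma filter_beq_of_nodup (l : List String) (h : l.Nodup) (p : String) :
    l.filter (fun x => x == p) = if p ∈ l then [p] else [] := by
  induction l with
  | nil => simp
  | cons a t ih =>
    simp only [List.nodup_cons] at h
    by_cases hap : a = p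
    · subst hap
      have ht : List.filter (fun x => x == a) t = [] :=
        List.filter_eq_nil_iff.mpr (fun x hx => by
          simp only [beq_iff_eq]; rintro rfl; exact h.1 hx)
      simp [ht]
    · rw [List.filter_cons, if_neg (by simp [hap]), ih h.2]
      by_cases hp : p ∈ t <;> simp [hp, Ne.symm hap]

-- filtering B's element→head pair stream for key p yields the heads of the voyages containing p
lemma pairs_filter_eq (voyage_list : List (List String)) (p : String) :
    ((voyage_list.flatMap (fun v => (PySem.List.dedup v).map (fun x => (x, PySem.List.pyGetD v 0 "")))).filter
        (fun q => q.1 == p)).map (fun q => q.2)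
      = (voyage_list.filter (fun v => decide (p ∈ v))).map (fun v => PySem.List.pyGetD v 0 "") := by
  induction voyage_list with
  | nil => simp
  | cons v rest ih =>
    simp only [List.flatMap_cons, List.filter_append, List.map_append, List.filter_cons, ih]
    have h1 : ((PySem.List.dedup v).map (fun x => (x, PySem.List.pyGetD v 0 ""))).filter (fun q => q.1 == p)
        = ((PySem.List.dedup v).filter (fun x => x == p)).map (fun x => (x, PySem.List.pyGetD v 0 "")) := by
      rw [List.filter_map]; rfl
    rw [h1, filter_beq_of_nodup _ (PySem.List.nodup_dedup v) p]
    by_cases hp : p ∈ v <;> simp [hp]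

lemma A_eq_flatMap (planets : List String) (voyage_list : List (List String)) :
    makeSpacecraftList planets voyage_list
      = planets.flatMap (fun p =>
          (voyage_list.filter (fun v => decide (p ∈ v))).map (fun v => (p, PySem.List.pyGetD v 0 ""))) := by
  unfold makeSpacecraftList
  simp only [PySem.List.foldl_append_ite, PySem.List.foldl_append_eq_flatMap, List.nil_append]

-- ===== VERDICT (by name: the statement is the Claim_ definition above) =====
theorem makeSpacecraftList_spec : Claim_equal_makeSpacecraftList := by
  intro planets voyage_list _
  unfold Spec_makeSpacecraftList makeSpacecraftList_alt
  rw [A_eq_flatMap]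
  simp only [PySem.Dict.getD_foldl_modify_append, PySem.Dict.getD_empty, List.nil_append]
  congr 1
  funext p
  rw [pairs_filter_eq voyage_list p, List.map_map]
  rfl
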